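-- pv_equiv track=rewrite | github.com/callezenwaka/motionstream | src/utils/summarizer.py | _parse_vulnerabilities_from_text
-- ===== SOURCE A (Python) =====
-- from typing import Dict, List, Any
--
-- def _parse_vulnerabilities_from_text(text: str) -> List[Dict[str, Any]]:
--     """Parse vulnerability information from text output."""
--     # This is a simple parser - you can make it more sophisticated
--     vulnerabilities = []
--
--     # Look for common vulnerability patterns in the text
--     lines = text.split('\n')
--     current_vuln = {}
--
--     for line in lines:
--         line = line.strip()
--         if 'CVE-' in line or 'GHSA-' in line:
--             if current_vuln:
--                 vulnerabilities.append(current_vuln)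
--             current_vuln = {'id': line}
--         elif any(severity in line.upper() for severity in ['CRITICAL', 'HIGH', 'MEDIUM', 'LOW']):
--             for severity in ['CRITICAL', 'HIGH', 'MEDIUM', 'LOW']:
--                 if severity in line.upper():
--                     current_vuln['severity'] = severity
--                     break
--
--     if current_vuln:
--         vulnerabilities.append(current_vuln)
--
--     return vulnerabilities
-- ===== SOURCE B (Python) =====
-- SEVS = ('CRITICAL', 'HIGH', 'MEDIUM', 'LOW')
--
-- def _is_id(line):
--     return 'CVE-' in line or 'GHSA-' in line
--
-- def _first_sev(line):
--     u = line.upper()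
--     for s in SEVS:
--         if s in u:
--             return s
--     return None
--
-- def _last_sev(block):
--     """Last line of the block carrying a severity keyword wins; its first keyword in SEVS order."""
--     for l in reversed(block):
--         s = _first_sev(l)
--         if s is not None:
--             return s
--     return None
--
-- def _blocks(lines):
--     """Split the stripped lines into blocks: a headless prefix block, then one block per id line."""
--     blocks = []
--     head, body = None, []
--     for l in lines:
--         if _is_id(l):
--             blocks.append((head, body))
--             head, body = l, []
--         else:
--             body.append(l)
--     blocks.append((head, body))
--     return blocks
--
-- def _parse_vulnerabilities_from_text(text):
--     """Parse vulnerability information from text output (segment into blocks, build each record independently)."""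
--     lines = [l.strip() for l in text.split('\n')]
--     out = []
--     for head, body in _blocks(lines):
--         rec = {}
--         if head is not None:
--             rec['id'] = head
--         s = _last_sev(body)
--         if s is not None:
--             rec['severity'] = s
--         if rec:
--             out.append(rec)
--     return out
-- ===== Notes on version B (the rewrite author's own statement) =====
-- stated objective: alternative
-- what changed: Replaced the stateful single-pass dict accumulator by a segmentation algorithm: the stripped lines are split into blocks at id lines, and each block is turned into its record independently, finding its severity by a backward scan (last severity line wins) instead of repeated overwrites.
import Mathlib
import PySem

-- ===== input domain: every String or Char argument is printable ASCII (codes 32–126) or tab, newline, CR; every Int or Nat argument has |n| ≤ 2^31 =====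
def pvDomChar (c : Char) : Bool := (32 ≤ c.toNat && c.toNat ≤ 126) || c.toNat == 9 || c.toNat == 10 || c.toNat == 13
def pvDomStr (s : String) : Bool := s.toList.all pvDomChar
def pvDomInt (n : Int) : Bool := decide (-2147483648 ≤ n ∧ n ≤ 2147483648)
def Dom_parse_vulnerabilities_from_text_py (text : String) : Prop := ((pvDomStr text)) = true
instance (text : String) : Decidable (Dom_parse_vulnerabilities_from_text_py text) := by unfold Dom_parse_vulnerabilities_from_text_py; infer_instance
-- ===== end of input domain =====

-- B replaces A's stateful single-pass dict accumulator by a segmentation algorithm: split the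
-- stripped lines into blocks at id lines, then build each block's record independently, finding
-- its severity by a backward scan (objective: alternative).

-- ===== PORT A =====
-- the severity keyword list ['CRITICAL', 'HIGH', 'MEDIUM', 'LOW']
def pvSevs : List String := ["CRITICAL", "HIGH", "MEDIUM", "LOW"]

-- A's inner 'for severity in [...]: if severity in line.upper(): current_vuln['severity'] = severity; break'
def pvSevLoopA (d : PySem.Dict String String) (up : String) :
    List String → PySem.Dict String String
  | [] => d
  | s :: rest => if PySem.Str.isIn s up then d.insert "severity" s else pvSevLoopA d up rest

-- A's loop body over one raw line, state = (vulnerabilities, current_vuln)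
def pvStepA (st : List (List (String × String)) × PySem.Dict String String) (line0 : String) :
    List (List (String × String)) × PySem.Dict String String :=
  let line := PySem.Str.strip line0
  if PySem.Str.isIn "CVE-" line || PySem.Str.isIn "GHSA-" line then
    ((if st.2.items ≠ [] then st.1 ++ [st.2.items] else st.1),
     (PySem.Dict.empty.insert "id" line))
  else if pvSevs.any (fun s => PySem.Str.isIn s (PySem.Str.upper line)) then
    (st.1, pvSevLoopA st.2 (PySem.Str.upper line) pvSevs)
  else st

def parse_vulnerabilities_from_text_py (text : String) : List (List (String × String)) :=
  -- text.split('\n'): split? is always `some` for the non-empty separator "\n"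
  let lines := (PySem.Str.split? text "\n").getD []
  let st := lines.foldl pvStepA ([], PySem.Dict.empty)
  if st.2.items ≠ [] then st.1 ++ [st.2.items] else st.1

-- ===== PORT B =====
-- B's _is_id helper
def pvIsId (l : String) : Bool := PySem.Str.isIn "CVE-" l || PySem.Str.isIn "GHSA-" l

-- B's _first_sev: first keyword of SEVS contained in line.upper(), else None
def pvFirstSevGo (u : String) : List String → Option String
  | [] => none
  | s :: rest => if PySem.Str.isIn s u then some s else pvFirstSevGo u rest

def pvFirstSev (l : String) : Option String := pvFirstSevGo (PySem.Str.upper l) pvSevs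

-- B's _last_sev: 'for l in reversed(block)' with early return
def pvLastSevGo : List String → Option String
  | [] => none
  | l :: rest => match pvFirstSev l with
    | some s => some s
    | none => pvLastSevGo rest

def pvLastSev (block : List String) : Option String := pvLastSevGo block.reverse

-- B's _blocks loop body, state = (blocks, head, body)
def pvBlockStep (st : List (Option String × List String) × Option String × List String)
    (l : String) : List (Option String × List String) × Option String × List String :=
  if pvIsId l then (st.1 ++ [(st.2.1, st.2.2)], some l, [])
  else (st.1, st.2.1, st.2.2 ++ [l])

def pvBlocks (lines : List String) : List (Option String × List String) :=
  let st := lines.foldl pvBlockStep ([], none, [])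
  st.1 ++ [(st.2.1, st.2.2)]

-- the body of B's main 'for head, body in _blocks(...)' loop: the record of one block, or none
def pvMkRec (b : Option String × List String) : Option (List (String × String)) :=
  let rec1 : PySem.Dict String String :=
    match b.1 with
    | none => PySem.Dict.empty
    | some h => PySem.Dict.empty.insert "id" h
  let rec2 : PySem.Dict String String :=
    match pvLastSev b.2 with
    | none => rec1
    | some s => rec1.insert "severity" s
  if rec2.items ≠ [] then some rec2.items else none

def parse_vulnerabilities_from_text_py_alt (text : String) : List (List (String × String)) :=
  -- text.split('\n'): split? is always `some` for the non-empty separator "\n"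
  let lines := ((PySem.Str.split? text "\n").getD []).map PySem.Str.strip
  (pvBlocks lines).filterMap pvMkRec

-- ===== PRECONDITION & SPEC =====
def Spec_parse_vulnerabilities_from_text_py (text : String) (out : List (List (String × String))) : Prop := out = parse_vulnerabilities_from_text_py_alt text
instance (text : String) (out : List (List (String × String))) : Decidable (Spec_parse_vulnerabilities_from_text_py text out) := by unfold Spec_parse_vulnerabilities_from_text_py; infer_instance

-- ===== CLAIM =====
def Claim_equal_parse_vulnerabilities_from_text_py : Prop := ∀ (text : String), Dom_parse_vulnerabilities_from_text_py text → Spec_parse_vulnerabilities_from_text_py text (parse_vulnerabilities_from_text_py text)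

-- ===== LEMMAS AND PROOFS =====

-- the dict A's state holds when the last id seen is `head` and the stripped lines since are `body`
def pvCur (head : Option String) (body : List String) : PySem.Dict String String :=
  let rec1 : PySem.Dict String String :=
    match head with
    | none => PySem.Dict.empty
    | some h => PySem.Dict.empty.insert "id" h
  match pvLastSev body with
  | none => rec1
  | some s => rec1.insert "severity" s

-- flushing a possibly-empty current dict
def pvClose (d : PySem.Dict String String) : List (List (String × String)) :=
  if d.items ≠ [] then [d.items] else []

-- recursive reading of A's loop, with the accumulator factored out
def pvRecA (cur : PySem.Dict String String) : List String → List (List (String × String))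
  | [] => pvClose cur
  | l0 :: rest =>
    let line := PySem.Str.strip l0
    if PySem.Str.isIn "CVE-" line || PySem.Str.isIn "GHSA-" line then
      pvClose cur ++ pvRecA (PySem.Dict.empty.insert "id" line) rest
    else match pvFirstSevGo (PySem.Str.upper line) pvSevs with
      | some s => pvRecA (cur.insert "severity" s) rest
      | none => pvRecA cur rest

-- recursive reading of B's _blocks loop
def pvBlocksR (head : Option String) (body : List String) :
    List String → List (Option String × List String)
  | [] => [(head, body)]
  | l :: rest =>
    if pvIsId l then (head, body) :: pvBlocksR (some l) [] rest
    else pvBlocksR head (body ++ [l]) rest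

-- A's guarded inner severity loop computes exactly the first-found keyword insertion
lemma sevLoop_eq_find (l : List String) (up : String) (d : PySem.Dict String String) :
    (if l.any (fun s => PySem.Str.isIn s up) then pvSevLoopA d up l else d)
      = (match pvFirstSevGo up l with
         | none => d
         | some s => d.insert "severity" s) := by
  induction l with
  | nil => simp [pvFirstSevGo]
  | cons s rest ih =>
    cases h : PySem.Str.isIn s up with
    | true => simp only [List.any_cons, h, Bool.true_or, reduceIte, pvSevLoopA, pvFirstSevGo]
    | false =>
      simp only [List.any_cons, h, Bool.false_or, pvSevLoopA, pvFirstSevGo,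
        Bool.false_eq_true, reduceIte]
      exact ih

-- A's fold from state (v, cur) equals v ++ the recursive reading from cur
set_option maxHeartbeats 1000000 in
lemma foldA_eq_recA (lines : List String) (v : List (List (String × String)))
    (cur : PySem.Dict String String) :
    (if (lines.foldl pvStepA (v, cur)).2.items ≠ [] then
       (lines.foldl pvStepA (v, cur)).1 ++ [(lines.foldl pvStepA (v, cur)).2.items]
     else (lines.foldl pvStepA (v, cur)).1) = v ++ pvRecA cur lines := by
  induction lines generalizing v cur with
  | nil =>
    simp only [List.foldl_nil, pvRecA, pvClose]
    by_cases h : cur.items = [] <;> simp [h]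
  | cons l0 rest ih =>
    simp only [List.foldl_cons, pvRecA]
    cases hid : (PySem.Str.isIn "CVE-" (PySem.Str.strip l0)
        || PySem.Str.isIn "GHSA-" (PySem.Str.strip l0)) with
    | true =>
      simp only [pvStepA, hid, reduceIte]
      rw [ih]
      simp only [pvClose]
      by_cases h : cur.items = [] <;> simp [h]
    | false =>
      simp only [pvStepA, hid, Bool.false_eq_true, reduceIte]
      have h := sevLoop_eq_find pvSevs (PySem.Str.upper (PySem.Str.strip l0)) cur
      cases hf : pvFirstSevGo (PySem.Str.upper (PySem.Str.strip l0)) pvSevs with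
      | none =>
        rw [hf] at h
        cases hany : pvSevs.any (fun s => PySem.Str.isIn s (PySem.Str.upper (PySem.Str.strip l0))) with
        | true =>
          simp only [hany, reduceIte] at h ⊢; rw [h]
          exact ih v cur
        | false =>
          simp only [Bool.false_eq_true, reduceIte]
          exact ih v cur
      | some s =>
        rw [hf] at h
        cases hany : pvSevs.any (fun s => PySem.Str.isIn s (PySem.Str.upper (PySem.Str.strip l0))) with
        | true =>
          simp only [hany, reduceIte] at h ⊢; rw [h]
          exact ih v (cur.insert "severity" s)
        | false =>
          simp only [hany, Bool.false_eq_true, reduceIte] at h ⊢; rw [← h]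
          exact ih v cur

-- B's fold from state (blocks, head, body) equals blocks ++ the recursive reading
lemma foldB_eq_blocksR (lines : List String) (bs : List (Option String × List String))
    (head : Option String) (body : List String) :
    (lines.foldl pvBlockStep (bs, head, body)).1
        ++ [((lines.foldl pvBlockStep (bs, head, body)).2.1,
             (lines.foldl pvBlockStep (bs, head, body)).2.2)]
      = bs ++ pvBlocksR head body lines := by
  induction lines generalizing bs head body with
  | nil => simp [pvBlocksR]
  | cons l rest ih =>
    simp only [List.foldl_cons, pvBlocksR, pvBlockStep]
    cases h : pvIsId l with
    | true => simp only [reduceIte]; rw [ih]; simp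
    | false => simp only [Bool.false_eq_true, reduceIte]; exact ih bs head (body ++ [l])

-- appending a line to the body updates pvLastSev by that line's first severity
lemma lastSev_append (body : List String) (l : String) :
    pvLastSev (body ++ [l])
      = (match pvFirstSev l with
         | some s => some s
         | none => pvLastSev body) := by
  simp only [pvLastSev, List.reverse_append, List.reverse_cons, List.reverse_nil,
    List.nil_append, List.cons_append, List.nil_append, pvLastSevGo]

-- updating A's current dict with a severity = the dict of the extended body
lemma cur_insert_sev (head : Option String) (body : List String) (l : String) (s : String)
    (hs : pvFirstSev l = some s) :
    (pvCur head body).insert "severity" s = pvCur head (body ++ [l]) := by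
  simp only [pvCur, lastSev_append, hs]
  cases ht : pvLastSev body with
  | none => rfl
  | some t => cases head <;> simp [PySem.Dict.insert_insert_self]

-- a severity-free line leaves A's current dict unchanged
lemma cur_no_sev (head : Option String) (body : List String) (l : String)
    (hs : pvFirstSev l = none) :
    pvCur head body = pvCur head (body ++ [l]) := by
  simp only [pvCur, lastSev_append, hs]

-- closing A's current dict = the record B builds from the corresponding block
lemma close_cur_eq_mkRec (head : Option String) (body : List String) :
    pvClose (pvCur head body) = (pvMkRec (head, body)).toList := by
  simp only [pvClose, pvCur, pvMkRec]
  cases pvLastSev body <;> cases head <;> simp [PySem.Dict.insert, PySem.Dict.empty]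

-- main invariant: A's recursion from the dict of (head, body) = B's records of the blocks
lemma recA_eq_blocks (lines : List String) (head : Option String) (body : List String) :
    pvRecA (pvCur head body) lines
      = (pvBlocksR head body (lines.map PySem.Str.strip)).filterMap pvMkRec := by
  induction lines generalizing head body with
  | nil =>
    simp only [pvRecA, List.map_nil, pvBlocksR, List.filterMap]
    rw [close_cur_eq_mkRec]
    cases pvMkRec (head, body) <;> simp
  | cons l0 rest ih =>
    simp only [pvRecA, List.map_cons, pvBlocksR]
    cases hid : pvIsId (PySem.Str.strip l0) with
    | true =>
      have hid' : (PySem.Str.isIn "CVE-" (PySem.Str.strip l0)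
          || PySem.Str.isIn "GHSA-" (PySem.Str.strip l0)) = true := hid
      simp only [hid', reduceIte, List.filterMap_cons]
      have hcur : PySem.Dict.empty.insert "id" (PySem.Str.strip l0)
          = pvCur (some (PySem.Str.strip l0)) [] := rfl
      rw [hcur, ih, close_cur_eq_mkRec]
      cases pvMkRec (head, body) <;> simp
    | false =>
      have hid' : (PySem.Str.isIn "CVE-" (PySem.Str.strip l0)
          || PySem.Str.isIn "GHSA-" (PySem.Str.strip l0)) = false := hid
      simp only [hid', Bool.false_eq_true, reduceIte]
      cases hf : pvFirstSev (PySem.Str.strip l0) with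
      | some s =>
        simp only [pvFirstSev] at hf
        rw [hf]
        show pvRecA ((pvCur head body).insert "severity" s) rest = _
        rw [cur_insert_sev head body (PySem.Str.strip l0) s (by simpa [pvFirstSev] using hf)]
        exact ih head (body ++ [PySem.Str.strip l0])
      | none =>
        simp only [pvFirstSev] at hf
        rw [hf]
        show pvRecA (pvCur head body) rest = _
        rw [cur_no_sev head body (PySem.Str.strip l0) (by simpa [pvFirstSev] using hf)]
        exact ih head (body ++ [PySem.Str.strip l0])

-- ===== VERDICT =====
theorem parse_vulnerabilities_from_text_py_spec : Claim_equal_parse_vulnerabilities_from_text_py := by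
  intro text _
  unfold Spec_parse_vulnerabilities_from_text_py
  simp only [parse_vulnerabilities_from_text_py, parse_vulnerabilities_from_text_py_alt, pvBlocks]
  rw [foldA_eq_recA, foldB_eq_blocksR]
  have : PySem.Dict.empty = pvCur (none : Option String) [] := rfl
  rw [this, recA_eq_blocks]
  simp
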